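-- pv_equiv track=rewrite | github.com/gcs272/advent-of-code | 2024/12/fences.py | fences
-- ===== SOURCE A (Python) =====
-- from typing import List, Tuple, Set
--
-- Position = Tuple[int, int]
--
-- def fences(region: Set[Position]) -> Tuple[int, int]:
--     perimeter = 0
--     for y, x in region:
--         perimeter += 4 - sum(
--             [
--                 (y - 1, x) in region,
--                 (y + 1, x) in region,
--                 (y, x - 1) in region,
--                 (y, x + 1) in region,
--             ]
--         )
--     return len(region), perimeter
-- ===== SOURCE B (Python) =====
-- def fences(region):
--     # Edge-multiset algorithm: every cell contributes its four unit edges to a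
--     # multiset (keyed on doubled coordinates so horizontal/vertical edges cannot
--     # collide); an edge lies on the boundary iff exactly one cell contributed it.
--     edges = {}
--     for y, x in region:
--         for e in ((2 * y, 2 * x + 1), (2 * y + 2, 2 * x + 1),
--                   (2 * y + 1, 2 * x), (2 * y + 1, 2 * x + 2)):
--             edges[e] = edges.get(e, 0) + 1
--     perimeter = sum(1 for c in edges.values() if c == 1)
--     return len(region), perimeter
-- ===== Notes on version B (the rewrite author's own statement) =====
-- stated objective: alternative
-- what changed: B builds a multiset (dict of counts keyed on doubled coordinates) of all 4n unit edges of the cells and reads the perimeter off as the number of edges contributed exactly once, instead of summing 4-minus-neighbour-count per cell with four membership tests.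
import Mathlib
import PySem

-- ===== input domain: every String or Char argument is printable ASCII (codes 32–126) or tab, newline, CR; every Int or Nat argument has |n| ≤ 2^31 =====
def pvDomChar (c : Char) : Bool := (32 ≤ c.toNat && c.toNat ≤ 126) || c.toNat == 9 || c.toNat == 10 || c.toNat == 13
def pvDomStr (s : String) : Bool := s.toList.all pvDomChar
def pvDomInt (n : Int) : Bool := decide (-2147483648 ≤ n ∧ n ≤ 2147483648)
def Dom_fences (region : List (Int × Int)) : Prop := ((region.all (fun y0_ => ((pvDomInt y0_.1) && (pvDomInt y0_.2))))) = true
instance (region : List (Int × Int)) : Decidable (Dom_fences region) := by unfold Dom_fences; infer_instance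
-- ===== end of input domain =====

-- B builds a multiset of the 4n unit edges of the cells (dict of counts, keyed on doubled
-- coordinates) and reads the perimeter off as the number of edges contributed exactly once,
-- instead of summing 4 minus the neighbour count per cell (objective: alternative algorithm).

-- ===== PORT A =====
def fences (region : List (Int × Int)) : Int × Int :=
  let perimeter : Int := region.foldl (fun perimeter c =>
    perimeter + (4 -
      ((if ((c.1 - 1, c.2) : Int × Int) ∈ region then (1:Int) else 0) +
       (if ((c.1 + 1, c.2) : Int × Int) ∈ region then (1:Int) else 0) +
       (if ((c.1, c.2 - 1) : Int × Int) ∈ region then (1:Int) else 0) +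
       (if ((c.1, c.2 + 1) : Int × Int) ∈ region then (1:Int) else 0)))) 0
  ((region.length : Int), perimeter)

-- ===== PORT B =====
-- the four unit edges of a cell, on doubled coordinates (Source B's inner tuple)
def pvEdges (c : Int × Int) : List (Int × Int) :=
  [(2*c.1, 2*c.2+1), (2*c.1+2, 2*c.2+1), (2*c.1+1, 2*c.2), (2*c.1+1, 2*c.2+2)]

def fences_alt (region : List (Int × Int)) : Int × Int :=
  let edges : PySem.Dict (Int × Int) Int :=
    region.foldl (fun d c =>
      (pvEdges c).foldl (fun d e => d.insert e (d.getD e 0 + 1)) d) PySem.Dict.empty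
  let perimeter : Int :=
    edges.values.foldl (fun acc v => acc + (if v == 1 then (1:Int) else 0)) 0
  ((region.length : Int), perimeter)

-- ===== PRECONDITION & SPEC =====
-- The Python parameter is a set; its list representation holds distinct elements (type convention).
def Pre_fences (region : List (Int × Int)) : Prop := region.Nodup
instance (region : List (Int × Int)) : Decidable (Pre_fences region) := by unfold Pre_fences; infer_instance
def pvWitness_fences : (List (Int × Int)) := [(0, 0), (0, 1), (1, 0)]
def Spec_fences (region : List (Int × Int)) (out : Int × Int) : Prop := out = fences_alt region
instance (region : List (Int × Int)) (out : Int × Int) : Decidable (Spec_fences region out) := by unfold Spec_fences; infer_instance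

-- ===== CLAIM (what is proved, stated in full; the proofs are below) =====
def Claim_equal_fences : Prop := ∀ (region : List (Int × Int)), Dom_fences region → Pre_fences region → Spec_fences region (fences region)

-- ===== LEMMAS AND PROOFS =====

-- the boundary predicate: the edge occurs exactly once in the edge multiset
def pvQ (L : List (Int × Int)) (e : Int × Int) : Bool := ((L.count e : Int) == 1)

-- how often a single cell contributes a given horizontal edge
theorem pvEdges_count_h (c : Int × Int) (y x : Int) :
    (pvEdges c).count (2*y, 2*x+1)
      = (if c = (y, x) then 1 else 0) + (if c = (y-1, x) then 1 else 0) := by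
  obtain ⟨a, b⟩ := c
  simp only [pvEdges, List.count_cons, List.count_nil, beq_iff_eq, Prod.mk.injEq]
  split_ifs <;> omega

-- how often a single cell contributes a given vertical edge
theorem pvEdges_count_v (c : Int × Int) (y x : Int) :
    (pvEdges c).count (2*y+1, 2*x)
      = (if c = (y, x) then 1 else 0) + (if c = (y, x-1) then 1 else 0) := by
  obtain ⟨a, b⟩ := c
  simp only [pvEdges, List.count_cons, List.count_nil, beq_iff_eq, Prod.mk.injEq]
  split_ifs <;> omega

-- multiplicity of a horizontal edge in the whole edge multiset
theorem pv_count_h (reg : List (Int × Int)) (y x : Int) :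
    (reg.flatMap pvEdges).count (2*y, 2*x+1) = reg.count (y, x) + reg.count (y-1, x) := by
  induction reg with
  | nil => simp
  | cons c t ih =>
    simp only [List.flatMap_cons, List.count_append, List.count_cons, ih,
      pvEdges_count_h, beq_iff_eq]
    split_ifs <;> omega

-- multiplicity of a vertical edge in the whole edge multiset
theorem pv_count_v (reg : List (Int × Int)) (y x : Int) :
    (reg.flatMap pvEdges).count (2*y+1, 2*x) = reg.count (y, x) + reg.count (y, x-1) := by
  induction reg with
  | nil => simp
  | cons c t ih =>
    simp only [List.flatMap_cons, List.count_append, List.count_cons, ih,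
      pvEdges_count_v, beq_iff_eq]
    split_ifs <;> omega

-- counting boundary edges over the distinct edges equals counting them over the multiset
theorem pv_countP_dedup (L : List (Int × Int)) :
    ((PySem.List.dedup L).countP (pvQ L) : Int) = (L.countP (pvQ L) : Int) := by
  have hQ : ∀ e, pvQ L e = true → L.count e = 1 := by
    intro e he; simpa [pvQ] using he
  have hDnd : ((PySem.List.dedup L).filter (pvQ L)).Nodup :=
    (PySem.List.nodup_dedup L).filter _
  have hLnd : (L.filter (pvQ L)).Nodup := by
    rw [List.nodup_iff_count_le_one]
    intro a
    by_cases hq : pvQ L a = true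
    · rw [List.count_filter hq, hQ a hq]
    · have : a ∉ L.filter (pvQ L) := by simp [List.mem_filter, hq]
      rw [List.count_eq_zero_of_not_mem this]
      omega
  have hperm : ((PySem.List.dedup L).filter (pvQ L)).Perm (L.filter (pvQ L)) := by
    rw [List.perm_ext_iff_of_nodup hDnd hLnd]
    intro a
    simp [List.mem_filter]
  rw [List.countP_eq_length_filter, List.countP_eq_length_filter, hperm.length_eq]

-- per cell (in a duplicate-free region): the number of its edges that are boundary edges
-- equals 4 minus its number of neighbours in the region
theorem pv_cell (reg : List (Int × Int)) (hnd : reg.Nodup) (c : Int × Int) (hc : c ∈ reg) :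
    (((pvEdges c).countP (pvQ (reg.flatMap pvEdges)) : Int))
      = 4 - ((if ((c.1 - 1, c.2) : Int × Int) ∈ reg then (1:Int) else 0) +
             (if ((c.1 + 1, c.2) : Int × Int) ∈ reg then (1:Int) else 0) +
             (if ((c.1, c.2 - 1) : Int × Int) ∈ reg then (1:Int) else 0) +
             (if ((c.1, c.2 + 1) : Int × Int) ∈ reg then (1:Int) else 0)) := by
  obtain ⟨y, x⟩ := c
  have hself : reg.count (y, x) = 1 := List.count_eq_one_of_mem hnd hc
  have hnbr : ∀ d : Int × Int, reg.count d = if d ∈ reg then 1 else 0 := by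
    intro d
    by_cases hd : d ∈ reg
    · simp [hd, List.count_eq_one_of_mem hnd hd]
    · simp [hd, List.count_eq_zero_of_not_mem hd]
  have h1 := pv_count_h reg y x
  have h2 := pv_count_h reg (y+1) x
  have h3 := pv_count_v reg y x
  have h4 := pv_count_v reg y (x+1)
  simp only [add_sub_cancel_right] at h2 h4
  simp only [pvEdges, List.countP_cons, List.countP_nil, pvQ]
  have e2 : ((2*(y+1), 2*x+1) : Int × Int) = (2*y+2, 2*x+1) := by simp [Prod.ext_iff]; ring
  have e4 : ((2*y+1, 2*(x+1)) : Int × Int) = (2*y+1, 2*x+2) := by simp [Prod.ext_iff]; ring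
  rw [e2] at h2; rw [e4] at h4
  simp only [h1, h2, h3, h4, hself, hnbr]
  by_cases m1 : ((y-1, x) : Int × Int) ∈ reg <;>
  by_cases m2 : ((y+1, x) : Int × Int) ∈ reg <;>
  by_cases m3 : ((y, x-1) : Int × Int) ∈ reg <;>
  by_cases m4 : ((y, x+1) : Int × Int) ∈ reg <;>
  simp [m1, m2, m3, m4]

-- B's perimeter is the number of distinct edges of multiplicity one
theorem pv_alt_snd (reg : List (Int × Int)) :
    (fences_alt reg).2
      = ((reg.flatMap pvEdges).countP (pvQ (reg.flatMap pvEdges)) : Int) := by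
  unfold fences_alt
  simp only []
  rw [← List.foldl_flatMap, PySem.Dict.foldl_insert_getD_add_one_eq_counter,
    PySem.List.foldl_add]
  simp only [PySem.Dict.values, PySem.Dict.items_counter, List.map_map, Function.comp_def,
    zero_add, ← PySem.List.dedup_eq_ofList]
  show (List.map (fun k => if pvQ (reg.flatMap pvEdges) k = true then (1:Int) else 0)
      (PySem.List.dedup (reg.flatMap pvEdges))).sum = _
  rw [PySem.List.sum_map_ite_one_zero, pv_countP_dedup]

-- A's perimeter is the same number, summed cell by cell
theorem pv_a_snd (reg : List (Int × Int)) (hnd : reg.Nodup) :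
    (fences reg).2
      = ((reg.flatMap pvEdges).countP (pvQ (reg.flatMap pvEdges)) : Int) := by
  unfold fences
  simp only []
  rw [PySem.List.foldl_add]
  simp only [zero_add]
  rw [← List.map_congr_left (fun c hc => pv_cell reg hnd c hc)]
  rw [List.countP_flatMap, Nat.cast_list_sum, List.map_map]
  simp [Function.comp_def]

-- ===== VERDICT (by name: the statement is the Claim_ definition above) =====
theorem fences_spec : Claim_equal_fences := by
  intro reg _ hnd
  unfold Spec_fences
  refine Prod.ext rfl ?_
  rw [pv_a_snd reg hnd, ← pv_alt_snd reg]
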